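-- pv_equiv track=rewrite | github.com/pypi-data/pypi-mirror-347 | packages/byu_pytest_utils/byu_pytest_utils-0.7.15-py3-none-any.whl/byu_pytest_utils/html/html_renderer.py | _build_comparison_strings
-- ===== SOURCE A (Python) =====
-- from typing import Optional
--
-- RED = "rgba(255, 99, 71, 0.4)"        # mismatch
--
-- GREEN = "rgba(50, 205, 50, 0.4)"      # extra in observed
--
-- BLUE = "rgba(100, 149, 237, 0.4)"     # extra in expected
--
-- def _build_comparison_strings(obs: str, exp: str, gap: str) -> tuple[str, str]:
--     """Return observed and expected strings with HTML span highlighting."""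
--     def wrap_span(text: str, color: Optional[str]) -> str:
--         return f'<span style="background-color:{color}; box-shadow: 0 0 0 {color};">{text}</span>' if text else ''
--
--     observed, expected = '', ''
--     curr_obs, curr_exp = '', ''
--     obs_color, exp_color = None, None
--
--     for o, e in zip(obs, exp):
--         if o == gap:
--             if obs_color != GREEN:
--                 observed += wrap_span(curr_obs, obs_color)
--                 curr_obs, obs_color = o, GREEN
--             else:
--                 curr_obs += o
--         elif e == gap:
--             if exp_color != RED:
--                 expected += wrap_span(curr_exp, exp_color)
--                 curr_exp, exp_color = e, RED
--             else:
--                 curr_exp += e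
--         elif o != e:
--             if obs_color != BLUE:
--                 observed += wrap_span(curr_obs, obs_color)
--                 curr_obs, obs_color = o, BLUE
--             else:
--                 curr_obs += o
--
--             if exp_color != BLUE:
--                 expected += wrap_span(curr_exp, exp_color)
--                 curr_exp, exp_color = e, BLUE
--             else:
--                 curr_exp += e
--         else:
--             observed += wrap_span(curr_obs, obs_color) + o
--             expected += wrap_span(curr_exp, exp_color) + e
--             curr_obs, curr_exp = '', ''
--             obs_color = exp_color = None
--
--     observed += wrap_span(curr_obs, obs_color)
--     expected += wrap_span(curr_exp, exp_color)
--
--     if len(obs) > len(exp):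
--         observed += wrap_span(obs[len(exp):], BLUE)
--     elif len(exp) > len(obs):
--         expected += wrap_span(exp[len(obs):], BLUE)
--
--     return observed, expected
-- ===== SOURCE B (Python) =====
-- from itertools import groupby
-- from typing import Optional
--
-- RED = "rgba(255, 99, 71, 0.4)"        # mismatch
-- GREEN = "rgba(50, 205, 50, 0.4)"      # extra in observed
-- BLUE = "rgba(100, 149, 237, 0.4)"     # extra in expected
--
--
-- def _build_comparison_strings(obs: str, exp: str, gap: str) -> tuple[str, str]:
--     """Return observed and expected strings with HTML span highlighting."""
--     def wrap_span(text: str, color: Optional[str]) -> str: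
--         return f'<span style="background-color:{color}; box-shadow: 0 0 0 {color};">{text}</span>' if text else ''
--
--     # Pass 1: classify each aligned position into per-stream (color, char) tokens.
--     obs_toks, exp_toks = [], []
--     for o, e in zip(obs, exp):
--         if o == gap:
--             obs_toks.append((GREEN, o))          # expected stream skips this position
--         elif e == gap:
--             exp_toks.append((RED, e))            # observed stream skips this position
--         elif o != e:
--             obs_toks.append((BLUE, o))
--             exp_toks.append((BLUE, e))
--         else:
--             obs_toks.append((None, o))
--             exp_toks.append((None, e))
--
--     # Pass 2: one span per run of equal color; matched runs are emitted raw.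
--     def render(toks):
--         return ''.join(
--             text if color is None else wrap_span(text, color)
--             for color, grp in groupby(toks, key=lambda t: t[0])
--             for text in (''.join(ch for _, ch in grp),)
--         )
--
--     observed, expected = render(obs_toks), render(exp_toks)
--
--     if len(obs) > len(exp):
--         observed += wrap_span(obs[len(exp):], BLUE)
--     elif len(exp) > len(obs):
--         expected += wrap_span(exp[len(obs):], BLUE)
--
--     return observed, expected
-- ===== Notes on version B (the rewrite author's own statement) =====
-- stated objective: alternative
-- what changed: Replaces A's single loop over six mutable run-state variables by a two-pass decomposition: first classify each zipped position into per-stream (color, char) tokens, then render each stream by grouping consecutive equal-color tokens (itertools.groupby) into one span per run.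
import Mathlib
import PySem

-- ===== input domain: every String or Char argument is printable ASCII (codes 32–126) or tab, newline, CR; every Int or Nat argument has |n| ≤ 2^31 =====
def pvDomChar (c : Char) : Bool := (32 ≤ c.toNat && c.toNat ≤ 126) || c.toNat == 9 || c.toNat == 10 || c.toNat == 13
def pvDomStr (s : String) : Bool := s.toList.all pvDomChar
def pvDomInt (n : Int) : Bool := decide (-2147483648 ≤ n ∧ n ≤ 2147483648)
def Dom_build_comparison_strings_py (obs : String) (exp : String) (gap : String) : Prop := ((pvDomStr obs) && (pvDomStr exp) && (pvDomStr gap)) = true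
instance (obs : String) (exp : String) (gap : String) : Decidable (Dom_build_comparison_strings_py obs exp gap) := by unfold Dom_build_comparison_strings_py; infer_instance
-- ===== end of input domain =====

-- B replaces A's six-variable running-state loop by a two-pass decomposition: classify each
-- aligned position into per-stream (color, char) tokens, then render one span per run of
-- equal color (objective: alternative decomposition; same cost).

-- color constants (shared literals)
def pvRED : List Char := "rgba(255, 99, 71, 0.4)".toList
def pvGREEN : List Char := "rgba(50, 205, 50, 0.4)".toList
def pvBLUE : List Char := "rgba(100, 149, 237, 0.4)".toList

-- f-string rendering of the color (None prints as "None"); wrap_span, shared by both sources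
def pvColorText : Option (List Char) → List Char
  | none => "None".toList
  | some c => c

def pvWrapSpan (text : List Char) (color : Option (List Char)) : List Char :=
  if text = [] then []
  else "<span style=\"background-color:".toList ++ pvColorText color
       ++ "; box-shadow: 0 0 0 ".toList ++ pvColorText color ++ ";\">".toList
       ++ text ++ "</span>".toList

-- ===== PORT A =====
-- A's loop: state (observed, expected, curr_obs, curr_exp, obs_color, exp_color)
def pvLoopA (gc : List Char) :
    List (Char × Char) → List Char → List Char → List Char → List Char →
    Option (List Char) → Option (List Char) → List Char × List Char
  | [], ob, ex, cobs, cexp, oc, ec =>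
      (ob ++ pvWrapSpan cobs oc, ex ++ pvWrapSpan cexp ec)
  | (o, e) :: rest, ob, ex, cobs, cexp, oc, ec =>
      if gc = [o] then
        if oc ≠ some pvGREEN then
          pvLoopA gc rest (ob ++ pvWrapSpan cobs oc) ex [o] cexp (some pvGREEN) ec
        else
          pvLoopA gc rest ob ex (cobs ++ [o]) cexp oc ec
      else if gc = [e] then
        if ec ≠ some pvRED then
          pvLoopA gc rest ob (ex ++ pvWrapSpan cexp ec) cobs [e] oc (some pvRED)
        else
          pvLoopA gc rest ob ex cobs (cexp ++ [e]) oc ec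
      else if o ≠ e then
        pvLoopA gc rest
          (if oc ≠ some pvBLUE then ob ++ pvWrapSpan cobs oc else ob)
          (if ec ≠ some pvBLUE then ex ++ pvWrapSpan cexp ec else ex)
          (if oc ≠ some pvBLUE then [o] else cobs ++ [o])
          (if ec ≠ some pvBLUE then [e] else cexp ++ [e])
          (some pvBLUE) (some pvBLUE)
      else
        pvLoopA gc rest (ob ++ pvWrapSpan cobs oc ++ [o]) (ex ++ pvWrapSpan cexp ec ++ [e])
          [] [] none none

def build_comparison_strings_py (obs : String) (exp : String) (gap : String) : String × String :=
  let gc := gap.toList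
  let ol := obs.toList
  let el := exp.toList
  let r := pvLoopA gc (ol.zip el) [] [] [] [] none none
  let ob := if el.length < ol.length then r.1 ++ pvWrapSpan (ol.drop el.length) (some pvBLUE) else r.1
  let ex := if ol.length < el.length then r.2 ++ pvWrapSpan (el.drop ol.length) (some pvBLUE) else r.2
  (String.ofList ob, String.ofList ex)

-- ===== PORT B =====
-- pass 1: per-stream (color, char) token lists
def pvTokens (gc : List Char) :
    List (Char × Char) → List (Option (List Char) × Char) × List (Option (List Char) × Char)
  | [] => ([], [])
  | (o, e) :: rest =>
      let r := pvTokens gc rest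
      if gc = [o] then ((some pvGREEN, o) :: r.1, r.2)
      else if gc = [e] then (r.1, (some pvRED, e) :: r.2)
      else if o ≠ e then ((some pvBLUE, o) :: r.1, (some pvBLUE, e) :: r.2)
      else ((none, o) :: r.1, (none, e) :: r.2)

-- a finished run: matched (colorless) runs are raw text, colored runs become one span
def pvRenderRun (color : Option (List Char)) (text : List Char) : List Char :=
  match color with
  | none => text
  | some _ => pvWrapSpan text color

-- pass 2: groupby on the color (port of itertools.groupby + join)
def pvGo : Option (List Char) → List Char → List (Option (List Char) × Char) → List Char
  | color, acc, [] => pvRenderRun color acc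
  | color, acc, (c, ch) :: rest =>
      if c = color then pvGo color (acc ++ [ch]) rest
      else pvRenderRun color acc ++ pvGo c [ch] rest

def build_comparison_strings_py_alt (obs : String) (exp : String) (gap : String) : String × String :=
  let gc := gap.toList
  let ol := obs.toList
  let el := exp.toList
  let t := pvTokens gc (ol.zip el)
  let ob0 := pvGo none [] t.1
  let ex0 := pvGo none [] t.2
  let ob := if el.length < ol.length then ob0 ++ pvWrapSpan (ol.drop el.length) (some pvBLUE) else ob0
  let ex := if ol.length < el.length then ex0 ++ pvWrapSpan (el.drop ol.length) (some pvBLUE) else ex0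
  (String.ofList ob, String.ofList ex)

-- ===== PRECONDITION & SPEC =====
def Spec_build_comparison_strings_py (obs : String) (exp : String) (gap : String) (out : String × String) : Prop := out = build_comparison_strings_py_alt obs exp gap
instance (obs : String) (exp : String) (gap : String) (out : String × String) : Decidable (Spec_build_comparison_strings_py obs exp gap out) := by unfold Spec_build_comparison_strings_py; infer_instance

-- ===== CLAIM (what is proved, stated in full; the proofs are below) =====
def Claim_equal_build_comparison_strings_py : Prop := ∀ (obs : String) (exp : String) (gap : String), Dom_build_comparison_strings_py obs exp gap → Spec_build_comparison_strings_py obs exp gap (build_comparison_strings_py obs exp gap)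

-- ===== LEMMAS AND PROOFS =====

-- a colorless pending run is a plain prefix of the rendering
theorem pvGo_none_acc (toks : List (Option (List Char) × Char)) :
    ∀ acc, pvGo none acc toks = acc ++ pvGo none [] toks := by
  induction toks with
  | nil => intro acc; simp [pvGo, pvRenderRun]
  | cons t rest ih =>
      intro acc
      obtain ⟨c, ch⟩ := t
      by_cases hc : c = none
      · subst hc
        simp only [pvGo, reduceIte]
        rw [ih (acc ++ [ch]), ih ([] ++ [ch])]
        simp
      · simp only [pvGo, if_neg hc, pvRenderRun]
        simp

-- finished-run rendering agrees with A's flush under A's state invariant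
theorem pvRenderRun_eq (oc : Option (List Char)) (cobs : List Char)
    (h : oc = none → cobs = []) : pvRenderRun oc cobs = pvWrapSpan cobs oc := by
  cases oc with
  | none => simp [h rfl, pvRenderRun, pvWrapSpan]
  | some c => rfl

-- main invariant: A's loop from any consistent state equals B's rendering continued
-- from the pending run
theorem pvLoop_eq_go (gc : List Char) :
    ∀ (l : List (Char × Char)) (ob ex cobs cexp : List Char)
      (oc ec : Option (List Char)),
      (oc = none → cobs = []) → (ec = none → cexp = []) →
      pvLoopA gc l ob ex cobs cexp oc ec =
        (ob ++ pvGo oc cobs (pvTokens gc l).1, ex ++ pvGo ec cexp (pvTokens gc l).2) := by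
  intro l
  induction l with
  | nil =>
      intro ob ex cobs cexp oc ec ho he
      simp [pvLoopA, pvTokens, pvGo, pvRenderRun_eq _ _ ho, pvRenderRun_eq _ _ he]
  | cons p rest ih =>
      intro ob ex cobs cexp oc ec ho he
      obtain ⟨o, e⟩ := p
      simp only [pvLoopA, pvTokens]
      by_cases hg : gc = [o]
      · -- gap in observed
        rw [if_pos hg, if_pos hg]
        by_cases hoc : oc = some pvGREEN
        · subst hoc
          rw [if_neg (show ¬(some pvGREEN ≠ some pvGREEN) from fun h => h rfl)]
          rw [ih _ _ _ _ _ _ (fun h => by simp at h) he]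
          simp [pvGo]
        · rw [if_pos hoc, ih _ _ _ _ _ _ (fun h => by simp at h) he]
          have hoc' : ¬(some pvGREEN = oc) := fun h => hoc h.symm
          simp only [pvGo, if_neg hoc']
          rw [pvRenderRun_eq _ _ ho]
          simp
      · rw [if_neg hg, if_neg hg]
        by_cases hge : gc = [e]
        · -- gap in expected
          rw [if_pos hge, if_pos hge]
          by_cases hec : ec = some pvRED
          · subst hec
            rw [if_neg (show ¬(some pvRED ≠ some pvRED) from fun h => h rfl)]
            rw [ih _ _ _ _ _ _ ho (fun h => by simp at h)]
            simp [pvGo]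
          · rw [if_pos hec, ih _ _ _ _ _ _ ho (fun h => by simp at h)]
            have hec' : ¬(some pvRED = ec) := fun h => hec h.symm
            simp only [pvGo, if_neg hec']
            rw [pvRenderRun_eq _ _ he]
            simp
        · rw [if_neg hge, if_neg hge]
          by_cases hne : o = e
          · -- match
            have hne' : ¬(o ≠ e) := fun h => h hne
            rw [if_neg hne', if_neg hne']
            rw [ih _ _ _ _ _ _ (fun _ => rfl) (fun _ => rfl)]
            simp only [Prod.mk.injEq]
            refine ⟨?_, ?_⟩
            · cases oc with
              | none =>
                  simp only [pvGo, reduceIte, ho rfl]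
                  rw [pvGo_none_acc _ ([] ++ [o])]
                  simp [pvWrapSpan]
              | some c =>
                  simp only [pvGo, if_neg (show ¬((none : Option (List Char)) = some c) from fun h => by simp at h)]
                  rw [pvGo_none_acc _ [o], pvRenderRun_eq _ _ ho]
                  simp
            · cases ec with
              | none =>
                  simp only [pvGo, reduceIte, he rfl]
                  rw [pvGo_none_acc _ ([] ++ [e])]
                  simp [pvWrapSpan]
              | some c =>
                  simp only [pvGo, if_neg (show ¬((none : Option (List Char)) = some c) from fun h => by simp at h)]
                  rw [pvGo_none_acc _ [e], pvRenderRun_eq _ _ he]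
                  simp
          · -- mismatch
            rw [if_pos hne, if_pos hne]
            rw [ih _ _ _ _ _ _ (fun h => by simp at h) (fun h => by simp at h)]
            simp only [Prod.mk.injEq]
            refine ⟨?_, ?_⟩
            · by_cases hoc : oc = some pvBLUE
              · subst hoc
                rw [if_neg (show ¬(some pvBLUE ≠ some pvBLUE) from fun h => h rfl)]
                simp [pvGo]
              · rw [if_pos hoc]
                have hoc' : ¬(some pvBLUE = oc) := fun h => hoc h.symm
                simp only [pvGo, if_neg hoc']
                rw [pvRenderRun_eq _ _ ho]
                simp [hoc]
            · by_cases hec : ec = some pvBLUE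
              · subst hec
                rw [if_neg (show ¬(some pvBLUE ≠ some pvBLUE) from fun h => h rfl)]
                simp [pvGo]
              · rw [if_pos hec]
                have hec' : ¬(some pvBLUE = ec) := fun h => hec h.symm
                simp only [pvGo, if_neg hec']
                rw [pvRenderRun_eq _ _ he]
                simp [hec]

-- ===== VERDICT (by name: the statement is the Claim_ definition above) =====
theorem build_comparison_strings_py_spec : Claim_equal_build_comparison_strings_py := by
  intro obs exp gap _
  unfold Spec_build_comparison_strings_py
  simp only [build_comparison_strings_py, build_comparison_strings_py_alt]
  rw [pvLoop_eq_go]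
  · simp
  · intro _; rfl
  · intro _; rfl
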